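-- pv_equiv track=rewrite | github.com/xinhaoyi/BPP | extract_pathway.py | get_entity_status_dic
-- ===== SOURCE A (Python) =====
-- def get_entity_status_dic(entity_index_to_list_of_relationships_dic) -> {str: int}:
--     entity_to_relationship_status_dic: {str: int} = {"total_num_of_entities": 0,
--                                                        "num_of_entities_with_one_relationship": 0,
--                                                        "num_of_entities_with_two_relationships": 0,
--                                                        "num_of_entities_with_three_relationships": 0,
--                                                        "num_of_entities_with_four_relationships": 0,
--                                                        "num_of_entities_with_five_relationships": 0,
--                                                        "num_of_entities_with_six_relationships": 0,
--                                                        "num_of_entities_with_seven_relationships": 0,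
--                                                        "num_of_entities_with_eight_relationships": 0,
--                                                        "num_of_entities_with_more_than_eight_relationships": 0}
--
--     dic_key_name: {int: str} = {1: "num_of_entities_with_one_relationship",
--                                 2: "num_of_entities_with_two_relationships",
--                                 3: "num_of_entities_with_three_relationships",
--                                 4: "num_of_entities_with_four_relationships",
--                                 5: "num_of_entities_with_five_relationships",
--                                 6: "num_of_entities_with_six_relationships",
--                                 7: "num_of_entities_with_seven_relationships",
--                                 8: "num_of_entities_with_eight_relationships"}
--
--     entity_to_relationship_status_dic["total_num_of_entities"] = len(entity_index_to_list_of_relationships_dic)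
--
--     for reaction_index, list_of_relationships in entity_index_to_list_of_relationships_dic.items():
--         num_of_relationships = len(list_of_relationships)
--         if num_of_relationships in dic_key_name.keys():
--             key_name = dic_key_name.get(num_of_relationships)
--             temp_val = entity_to_relationship_status_dic.get(key_name)
--             entity_to_relationship_status_dic[dic_key_name.get(len(list_of_relationships))] = temp_val + 1
--         else:
--             temp_val = entity_to_relationship_status_dic.get(
--                 "num_of_entities_with_more_than_eight_relationships")
--             entity_to_relationship_status_dic[
--                 "num_of_entities_with_more_than_eight_relationships"] = temp_val + 1
--
--     return entity_to_relationship_status_dic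
-- ===== SOURCE B (Python) =====
-- def get_entity_status_dic(entity_index_to_list_of_relationships_dic) -> {str: int}:
--     # Staged per-bucket counting: extract the lengths once, then for each of the
--     # eight named buckets take lengths.count(i); the overflow bucket is derived
--     # arithmetically as total minus the matched entities (correct because every
--     # entity whose length is not 1..8 goes to the overflow bucket in A).
--     names = ["num_of_entities_with_one_relationship",
--              "num_of_entities_with_two_relationships",
--              "num_of_entities_with_three_relationships",
--              "num_of_entities_with_four_relationships",
--              "num_of_entities_with_five_relationships",
--              "num_of_entities_with_six_relationships",
--              "num_of_entities_with_seven_relationships",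
--              "num_of_entities_with_eight_relationships"]
--     lengths = [len(v) for v in entity_index_to_list_of_relationships_dic.values()]
--     total = len(lengths)
--     result = {"total_num_of_entities": total}
--     matched = 0
--     for i, name in enumerate(names, start=1):
--         c = lengths.count(i)
--         result[name] = c
--         matched += c
--     result["num_of_entities_with_more_than_eight_relationships"] = total - matched
--     return result
-- ===== Notes on version B (the rewrite author's own statement) =====
-- stated objective: alternative
-- what changed: B never buckets: it extracts the length list once, fills each of the eight named counters with a separate lengths.count(i) pass, and derives the overflow bucket arithmetically as total minus matched instead of counting it at all.
import Mathlib
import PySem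

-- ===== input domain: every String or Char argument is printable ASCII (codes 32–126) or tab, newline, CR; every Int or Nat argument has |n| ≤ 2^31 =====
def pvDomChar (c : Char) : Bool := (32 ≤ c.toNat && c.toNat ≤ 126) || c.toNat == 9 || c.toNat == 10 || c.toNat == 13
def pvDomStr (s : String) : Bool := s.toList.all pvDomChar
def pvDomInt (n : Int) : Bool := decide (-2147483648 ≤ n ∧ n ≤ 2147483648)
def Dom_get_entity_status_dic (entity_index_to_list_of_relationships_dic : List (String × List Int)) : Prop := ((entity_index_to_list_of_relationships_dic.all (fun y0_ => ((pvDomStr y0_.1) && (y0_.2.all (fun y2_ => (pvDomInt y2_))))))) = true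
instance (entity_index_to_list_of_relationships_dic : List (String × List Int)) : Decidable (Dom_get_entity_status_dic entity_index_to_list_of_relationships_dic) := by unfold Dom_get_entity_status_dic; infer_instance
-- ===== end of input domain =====

-- B replaces A's inline per-entity bucketing by eight separate lengths.count passes plus an arithmetically derived overflow bucket (alternative decomposition; same asymptotic cost).


-- ===== PORT A =====
-- the loop body of A (helper so the proofs can talk about one step)
def pvStepA (dic_key_name : PySem.Dict Int String)
    (s : PySem.Dict String Int) (list_of_relationships : List Int) : PySem.Dict String Int :=
  let num_of_relationships : Int := list_of_relationships.length
  if dic_key_name.contains num_of_relationships then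
    -- dic_key_name.get / status.get always hit here (the key was just tested / pre-initialised); the getD defaults are unreachable
    let key_name := (dic_key_name.get? num_of_relationships).getD ""
    let temp_val := (s.get? key_name).getD 0
    s.insert ((dic_key_name.get? ((list_of_relationships.length : Int))).getD "") (temp_val + 1)
  else
    let temp_val := (s.get? "num_of_entities_with_more_than_eight_relationships").getD 0
    s.insert "num_of_entities_with_more_than_eight_relationships" (temp_val + 1)

def get_entity_status_dic (entity_index_to_list_of_relationships_dic : List (String × List Int)) : List (String × Int) :=
  let entity_to_relationship_status_dic : PySem.Dict String Int := PySem.Dict.ofList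
    [("total_num_of_entities", 0),
     ("num_of_entities_with_one_relationship", 0),
     ("num_of_entities_with_two_relationships", 0),
     ("num_of_entities_with_three_relationships", 0),
     ("num_of_entities_with_four_relationships", 0),
     ("num_of_entities_with_five_relationships", 0),
     ("num_of_entities_with_six_relationships", 0),
     ("num_of_entities_with_seven_relationships", 0),
     ("num_of_entities_with_eight_relationships", 0),
     ("num_of_entities_with_more_than_eight_relationships", 0)]
  let dic_key_name : PySem.Dict Int String := PySem.Dict.ofList
    [(1, "num_of_entities_with_one_relationship"),
     (2, "num_of_entities_with_two_relationships"),
     (3, "num_of_entities_with_three_relationships"),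
     (4, "num_of_entities_with_four_relationships"),
     (5, "num_of_entities_with_five_relationships"),
     (6, "num_of_entities_with_six_relationships"),
     (7, "num_of_entities_with_seven_relationships"),
     (8, "num_of_entities_with_eight_relationships")]
  let s := entity_to_relationship_status_dic.insert "total_num_of_entities"
      (entity_index_to_list_of_relationships_dic.length : Int)
  let s := entity_index_to_list_of_relationships_dic.foldl
      (fun s kv => pvStepA dic_key_name s kv.2) s
  s.items

-- ===== PORT B =====
-- enumerate(names, start=1): the eight named buckets with their bucket numbers
def pvNames : List (Int × String) :=
  [(1, "num_of_entities_with_one_relationship"),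
   (2, "num_of_entities_with_two_relationships"),
   (3, "num_of_entities_with_three_relationships"),
   (4, "num_of_entities_with_four_relationships"),
   (5, "num_of_entities_with_five_relationships"),
   (6, "num_of_entities_with_six_relationships"),
   (7, "num_of_entities_with_seven_relationships"),
   (8, "num_of_entities_with_eight_relationships")]

def get_entity_status_dic_alt (entity_index_to_list_of_relationships_dic : List (String × List Int)) : List (String × Int) :=
  let lengths : List Int :=
    entity_index_to_list_of_relationships_dic.map (fun v => (v.2.length : Int))
  let total : Int := (lengths.length : Int)
  -- result starts as {"total_num_of_entities": total}; every key written later is fresh,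
  -- so each dict write is an append
  let st := pvNames.foldl
    (fun (acc : List (String × Int) × Int) p =>
      let c : Int := (PySem.List.count lengths p.1 : Int)
      (acc.1 ++ [(p.2, c)], acc.2 + c))
    ([("total_num_of_entities", total)], 0)
  st.1 ++ [("num_of_entities_with_more_than_eight_relationships", total - st.2)]

-- ===== PRECONDITION & SPEC =====
def Spec_get_entity_status_dic (entity_index_to_list_of_relationships_dic : List (String × List Int)) (out : List (String × Int)) : Prop := out = get_entity_status_dic_alt entity_index_to_list_of_relationships_dic
instance (entity_index_to_list_of_relationships_dic : List (String × List Int)) (out : List (String × Int)) : Decidable (Spec_get_entity_status_dic entity_index_to_list_of_relationships_dic out) := by unfold Spec_get_entity_status_dic; infer_instance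

-- ===== CLAIM =====
def Claim_equal_get_entity_status_dic : Prop := ∀ (entity_index_to_list_of_relationships_dic : List (String × List Int)), Dom_get_entity_status_dic entity_index_to_list_of_relationships_dic → Spec_get_entity_status_dic entity_index_to_list_of_relationships_dic (get_entity_status_dic entity_index_to_list_of_relationships_dic)

-- ===== LEMMAS AND PROOFS =====

-- bucket id an entity falls into in A: its relationship count if 1..8, else 9
def pvBucket (l : List Int) : Int :=
  if 1 ≤ (l.length : Int) ∧ (l.length : Int) ≤ 8 then (l.length : Int) else 9

-- the state of A's loop: total plus the nine bucket counters, keys fixed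
def pvMkS (t c1 c2 c3 c4 c5 c6 c7 c8 c9 : Int) : PySem.Dict String Int :=
  PySem.Dict.mk
    [("total_num_of_entities", t),
     ("num_of_entities_with_one_relationship", c1),
     ("num_of_entities_with_two_relationships", c2),
     ("num_of_entities_with_three_relationships", c3),
     ("num_of_entities_with_four_relationships", c4),
     ("num_of_entities_with_five_relationships", c5),
     ("num_of_entities_with_six_relationships", c6),
     ("num_of_entities_with_seven_relationships", c7),
     ("num_of_entities_with_eight_relationships", c8),
     ("num_of_entities_with_more_than_eight_relationships", c9)]

def pvKeyName : PySem.Dict Int String := PySem.Dict.mk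
  [(1, "num_of_entities_with_one_relationship"),
   (2, "num_of_entities_with_two_relationships"),
   (3, "num_of_entities_with_three_relationships"),
   (4, "num_of_entities_with_four_relationships"),
   (5, "num_of_entities_with_five_relationships"),
   (6, "num_of_entities_with_six_relationships"),
   (7, "num_of_entities_with_seven_relationships"),
   (8, "num_of_entities_with_eight_relationships")]

-- bucket counts of the input, as an Int
def pvCnt (d : List (String × List Int)) (i : Int) : Int :=
  ((d.map (fun kv => pvBucket kv.2)).count i : Int)

lemma pvCnt_cons (x : String × List Int) (d : List (String × List Int)) (i : Int) :
    pvCnt (x :: d) i = (if pvBucket x.2 = i then 1 else 0) + pvCnt d i := by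
  simp only [pvCnt, List.map_cons, List.count_cons, beq_iff_eq]
  push_cast
  split_ifs <;> ring

lemma pvStepA_mkS (t c1 c2 c3 c4 c5 c6 c7 c8 c9 : Int) (l : List Int) :
    pvStepA pvKeyName (pvMkS t c1 c2 c3 c4 c5 c6 c7 c8 c9) l =
      pvMkS t
        (c1 + if pvBucket l = 1 then 1 else 0)
        (c2 + if pvBucket l = 2 then 1 else 0)
        (c3 + if pvBucket l = 3 then 1 else 0)
        (c4 + if pvBucket l = 4 then 1 else 0)
        (c5 + if pvBucket l = 5 then 1 else 0)
        (c6 + if pvBucket l = 6 then 1 else 0)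
        (c7 + if pvBucket l = 7 then 1 else 0)
        (c8 + if pvBucket l = 8 then 1 else 0)
        (c9 + if pvBucket l = 9 then 1 else 0) := by
  unfold pvStepA pvBucket
  generalize l.length = n
  rcases Nat.lt_or_ge n 9 with h | h
  · interval_cases n <;>
      simp only [Nat.cast_zero, Nat.cast_one, Nat.cast_ofNat] <;> norm_num <;> rfl
  · have hc : pvKeyName.contains ((n : Nat) : Int) = false := by
      simp [pvKeyName, PySem.Dict.contains_mk]; omega
    have h1 : ¬(1 ≤ (n : Int) ∧ (n : Int) ≤ 8) := by omega
    simp only [hc, Bool.false_eq_true, if_false, if_neg h1]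
    norm_num
    rfl

lemma pvFoldA (d : List (String × List Int)) (t c1 c2 c3 c4 c5 c6 c7 c8 c9 : Int) :
    d.foldl (fun s kv => pvStepA pvKeyName s kv.2) (pvMkS t c1 c2 c3 c4 c5 c6 c7 c8 c9) =
      pvMkS t (c1 + pvCnt d 1) (c2 + pvCnt d 2) (c3 + pvCnt d 3) (c4 + pvCnt d 4)
        (c5 + pvCnt d 5) (c6 + pvCnt d 6) (c7 + pvCnt d 7) (c8 + pvCnt d 8) (c9 + pvCnt d 9) := by
  induction d generalizing c1 c2 c3 c4 c5 c6 c7 c8 c9 with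
  | nil => simp [pvCnt]
  | cons x d ih =>
      simp only [List.foldl_cons, pvStepA_mkS, ih, pvCnt_cons]
      simp only [pvMkS, PySem.Dict.mk.injEq, List.cons.injEq, Prod.mk.injEq, true_and, and_true]
      omega

-- for a bucket id 1..8, A's bucket count is exactly B's lengths.count i
lemma pvCnt_eq_count (d : List (String × List Int)) (i : Int) (h1 : 1 ≤ i) (h8 : i ≤ 8) :
    pvCnt d i = ((d.map (fun v => ((v.2.length : Int)))).count i : Int) := by
  induction d with
  | nil => simp [pvCnt]
  | cons x d ih =>
      rw [pvCnt_cons, ih]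
      simp only [List.map_cons, List.count_cons, beq_iff_eq]
      have hb : (pvBucket x.2 = i) ↔ ((x.2.length : Int) = i) := by
        unfold pvBucket
        split_ifs with h
        · exact Iff.rfl
        · constructor <;> intro h' <;> omega
      push_cast
      split_ifs with h h' h' <;> simp_all <;> omega

lemma pvBucket_bounds (l : List Int) : 1 ≤ pvBucket l ∧ pvBucket l ≤ 9 := by
  unfold pvBucket; split_ifs with h <;> omega

-- the overflow bucket is the complement of the eight matched buckets
lemma pvCnt_nine (d : List (String × List Int)) :
    pvCnt d 9 = (d.length : Int) - (pvCnt d 1 + pvCnt d 2 + pvCnt d 3 + pvCnt d 4 +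
      pvCnt d 5 + pvCnt d 6 + pvCnt d 7 + pvCnt d 8) := by
  induction d with
  | nil => simp [pvCnt]
  | cons x d ih =>
      simp only [pvCnt_cons, List.length_cons]
      have hb := pvBucket_bounds x.2
      push_cast
      split_ifs <;> omega

-- ===== VERDICT =====
theorem get_entity_status_dic_spec : Claim_equal_get_entity_status_dic := by
  intro d _
  show get_entity_status_dic d = get_entity_status_dic_alt d
  have hA : get_entity_status_dic d =
      (d.foldl (fun s kv => pvStepA pvKeyName s kv.2)
        (pvMkS (d.length : Int) 0 0 0 0 0 0 0 0 0)).items := rfl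
  rw [hA, pvFoldA]
  unfold get_entity_status_dic_alt pvNames
  simp only [List.foldl_cons, List.foldl_nil, List.length_map, PySem.List.count_eq]
  rw [pvCnt_nine]
  rw [pvCnt_eq_count d 1 (by omega) (by omega), pvCnt_eq_count d 2 (by omega) (by omega),
      pvCnt_eq_count d 3 (by omega) (by omega), pvCnt_eq_count d 4 (by omega) (by omega),
      pvCnt_eq_count d 5 (by omega) (by omega), pvCnt_eq_count d 6 (by omega) (by omega),
      pvCnt_eq_count d 7 (by omega) (by omega), pvCnt_eq_count d 8 (by omega) (by omega)]
  simp [pvMkS]
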